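-- pv_equiv track=rewrite | github.com/neumanns-workshop/PL8WRDS | app/services/orthographic_scorer.py | _extract_matching_sequence
-- ===== SOURCE A (Python) =====
-- from typing import Dict, Any, List, Tuple
--
-- def _extract_matching_sequence(word: str, plate: str) -> List[str]:
--     """Extract the subsequence from word that matches the plate pattern."""
--     word_lower = word.lower()
--     plate_lower = plate.lower()
--
--     # Find positions of plate letters in word (subsequence matching)
--     matching_chars = []
--     word_pos = 0
--
--     for plate_char in plate_lower:
--         # Find next occurrence of this plate character in word
--         while word_pos < len(word_lower) and word_lower[word_pos] != plate_char:
--             word_pos += 1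
--
--         if word_pos < len(word_lower):
--             matching_chars.append(word_lower[word_pos])
--             word_pos += 1
--         else:
--             # Should not happen if word actually matches plate
--             break
--
--     return matching_chars
-- ===== SOURCE B (Python) =====
-- def _extract_matching_sequence(word: str, plate: str) -> list:
--     """Extract the subsequence from word that matches the plate pattern."""
--     word_lower = word.lower()
--     plate_lower = plate.lower()
--     matching_chars = []
--     plate_idx = 0
--     for ch in word_lower:
--         if plate_idx < len(plate_lower) and ch == plate_lower[plate_idx]:
--             matching_chars.append(ch)
--             plate_idx += 1
--     return matching_chars
-- ===== Notes on version B (the rewrite author's own statement) =====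
-- stated objective: alternative
-- what changed: Inverted loop structure: B iterates once over the word with a plate index and a single equality test per word character, instead of A's loop over plate characters with an inner while-scan over the word.
import Mathlib
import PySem

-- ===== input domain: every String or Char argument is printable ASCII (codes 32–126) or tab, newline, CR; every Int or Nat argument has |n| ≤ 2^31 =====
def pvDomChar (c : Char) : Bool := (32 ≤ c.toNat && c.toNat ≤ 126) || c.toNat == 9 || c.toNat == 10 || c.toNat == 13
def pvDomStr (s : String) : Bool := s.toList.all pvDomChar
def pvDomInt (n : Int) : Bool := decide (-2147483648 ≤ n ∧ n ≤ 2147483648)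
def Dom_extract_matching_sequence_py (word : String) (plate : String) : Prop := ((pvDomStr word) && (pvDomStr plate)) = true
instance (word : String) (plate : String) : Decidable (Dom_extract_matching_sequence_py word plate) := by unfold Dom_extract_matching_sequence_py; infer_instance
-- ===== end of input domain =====

-- B inverts the loop structure (one pass over the word with a plate index, instead of a loop
-- over the plate with an inner while-scan of the word): an alternative decomposition, same cost.

-- ===== PORT A =====
-- the inner `while word_pos < len(word_lower) and word_lower[word_pos] != plate_char: word_pos += 1`
def pvSkipWhile (w : List Char) (c : Char) (pos : Nat) : Nat :=
  if h : pos < w.length then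
    if w[pos] = c then pos else pvSkipWhile w c (pos + 1)
  else pos
termination_by w.length - pos

-- the `for plate_char in plate_lower:` loop, carrying word_pos and emitting matching_chars
def pvAGo (w : List Char) : List Char → Nat → List String
  | [], _ => []
  | c :: rest, pos =>
    let q := pvSkipWhile w c pos
    if h : q < w.length then (w[q]).toString :: pvAGo w rest (q + 1) else []

def extract_matching_sequence_py (word : String) (plate : String) : List String :=
  pvAGo (PySem.Str.lower word).toList (PySem.Str.lower plate).toList 0

-- ===== PORT B =====
-- B's `for ch in word_lower:` loop, carrying plate_idx
def pvBGo (p : List Char) : List Char → Nat → List String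
  | [], _ => []
  | ch :: ws, idx =>
    if h : idx < p.length then
      if ch = p[idx] then ch.toString :: pvBGo p ws (idx + 1) else pvBGo p ws idx
    else pvBGo p ws idx

def extract_matching_sequence_py_alt (word : String) (plate : String) : List String :=
  pvBGo (PySem.Str.lower plate).toList (PySem.Str.lower word).toList 0

-- ===== PRECONDITION & SPEC =====
def Spec_extract_matching_sequence_py (word : String) (plate : String) (out : List String) : Prop := out = extract_matching_sequence_py_alt word plate
instance (word : String) (plate : String) (out : List String) : Decidable (Spec_extract_matching_sequence_py word plate out) := by unfold Spec_extract_matching_sequence_py; infer_instance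

-- ===== CLAIM (what is proved, stated in full; the proofs are below) =====
def Claim_equal_extract_matching_sequence_py : Prop := ∀ (word : String) (plate : String), Dom_extract_matching_sequence_py word plate → Spec_extract_matching_sequence_py word plate (extract_matching_sequence_py word plate)

-- ===== LEMMAS AND PROOFS =====

-- common list-to-list form both loops reduce to
def pvCGo : List Char → List Char → List String
  | [], _ => []
  | _ :: _, [] => []
  | q :: qs, ch :: ws => if ch = q then ch.toString :: pvCGo qs ws else pvCGo (q :: qs) ws

theorem pvBGo_eq_cGo (p : List Char) (ws : List Char) (idx : Nat) :
    pvBGo p ws idx = pvCGo (p.drop idx) ws := by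
  induction ws generalizing idx with
  | nil => cases h : p.drop idx <;> simp [pvBGo, pvCGo]
  | cons ch ws ih =>
    by_cases h : idx < p.length
    · rw [List.drop_eq_getElem_cons h]
      by_cases hc : ch = p[idx]
      · simp [pvBGo, pvCGo, h, hc, ih]
      · simp [pvBGo, pvCGo, h, hc, ih, ← List.drop_eq_getElem_cons h]
    · have hd : p.drop idx = [] := List.drop_eq_nil_of_le (by omega)
      simp [pvBGo, pvCGo, h, ih, hd]

theorem pvCGo_skip (w : List Char) (c : Char) (qs : List Char) (pos : Nat) :
    pvCGo (c :: qs) (w.drop pos) =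
      (if h : pvSkipWhile w c pos < w.length
       then (w[pvSkipWhile w c pos]).toString :: pvCGo qs (w.drop (pvSkipWhile w c pos + 1))
       else []) := by
  fun_induction pvSkipWhile w c pos with
  | case1 pos h hc =>
    rw [List.drop_eq_getElem_cons h]
    simp [pvCGo, hc, h]
  | case2 pos h hc ih =>
    rw [List.drop_eq_getElem_cons h]
    simpa [pvCGo, hc] using ih
  | case3 pos h =>
    have hd : w.drop pos = [] := List.drop_eq_nil_of_le (by omega)
    simp [pvCGo, hd, h]

theorem pvAGo_eq_cGo (w : List Char) (p : List Char) (pos : Nat) :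
    pvAGo w p pos = pvCGo p (w.drop pos) := by
  induction p generalizing pos with
  | nil => cases h : w.drop pos <;> simp [pvAGo, pvCGo]
  | cons c qs ih => rw [pvCGo_skip]; simp [pvAGo, ih]

-- ===== VERDICT (by name: the statement is the Claim_ definition above) =====
theorem extract_matching_sequence_py_spec : Claim_equal_extract_matching_sequence_py := by
  intro word plate _
  unfold Spec_extract_matching_sequence_py extract_matching_sequence_py extract_matching_sequence_py_alt
  rw [pvAGo_eq_cGo, pvBGo_eq_cGo]
  simp
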